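-- pv_equiv track=rewrite | github.com/qwas15788hj/Baekjoon | 프로그래머스/unrated/150368. 이모티콘 할인행사/이모티콘 할인행사.py | solution
-- ===== SOURCE A (Python) =====
-- from itertools import product
--
-- def solution(users, emoticons):
--     answer = [0, 0]
--     sales = [10, 20, 30, 40]
--
--     for sale in list(product(sales, repeat = len(emoticons))): # 모든 세일의 종류
--         emo = [] # 세일된 이모티콘 값
--         plus = 0 # 플러스 가입한 유저 수
--         money = 0 # 유저가 사용한 금액
--         for i in range(len(sale)): # 세일된 이모티콘 값 구하기
--             emo.append(emoticons[i] - (emoticons[i] * sale[i] // 100))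
--
--         for u in users: # 유저 마다
--             u_m = 0 # 유저가 사용한 금액
--             for j in range(len(sale)): # 이모티콘 하나씩 확인
--                 if u[0] <= sale[j]: # 유저가 원하는 세일보다 현재 세일을 더 많이하거나 같으면
--                     u_m += emo[j] # 해당 이모티콘 구매
--             if u_m >= u[1]: # 유저가 사용한 금액이 자신이 원하는 금액보다 크거나 같으면
--                 plus += 1 # 플러스 가입
--             else: # 원하는 금액보다 적게 사용하면
--                 money += u_m # 금액만 증가
--
--         if plus > answer[0]: # 플러스 가입 인원이 기존 보다 많으면
--             answer[0], answer[1] = plus, money # 갱신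
--         elif plus == answer[0]: # 플러스 가입 인원이 기존과 같으면
--             answer[1] = max(answer[1], money) # 가격만 비교하여 갱신
--
--     return answer
-- ===== SOURCE B (Python) =====
-- def solution(users, emoticons):
--     best = (0, 0)
--
--     def dfs(i, ps):
--         nonlocal best
--         if i == len(emoticons):
--             plus, money = 0, 0
--             for u, s in ps:
--                 if s >= u[1]:
--                     plus += 1
--                 else:
--                     money += s
--             if (plus, money) > best:
--                 best = (plus, money)
--             return
--         p = emoticons[i]
--         for rate in (10, 20, 30, 40):
--             d = p - p * rate // 100
--             dfs(i + 1, [(u, s + d) if u[0] <= rate else (u, s) for u, s in ps])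
--
--     dfs(0, [(u, 0) for u in users])
--     return [best[0], best[1]]
-- ===== Notes on version B (the rewrite author's own statement) =====
-- stated objective: faster
-- what changed: Replaces the itertools.product enumeration that rebuilds the discounted-price list and rescans all n emoticons per user at every combination with a DFS over emoticons that threads per-user partial spendings downward, so shared sale-level prefixes are discounted and added to each user's spending only once and each leaf does O(m) work instead of O(m*n).
import Mathlib
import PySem

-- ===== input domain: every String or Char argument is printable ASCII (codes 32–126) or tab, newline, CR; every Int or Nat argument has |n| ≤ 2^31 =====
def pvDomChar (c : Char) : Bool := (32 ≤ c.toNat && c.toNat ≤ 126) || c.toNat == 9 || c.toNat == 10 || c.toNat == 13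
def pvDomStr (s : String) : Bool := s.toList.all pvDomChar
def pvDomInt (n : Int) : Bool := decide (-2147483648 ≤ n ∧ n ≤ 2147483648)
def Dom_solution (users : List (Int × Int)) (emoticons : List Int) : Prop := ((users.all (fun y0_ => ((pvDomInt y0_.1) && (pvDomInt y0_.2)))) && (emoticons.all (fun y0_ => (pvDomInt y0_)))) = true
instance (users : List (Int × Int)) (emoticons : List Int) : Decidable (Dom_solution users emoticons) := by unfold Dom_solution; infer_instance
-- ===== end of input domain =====

-- B replaces the product(...) enumeration (which rebuilds the discounted list and rescans all
-- emoticons per user at every combination) by a DFS over emoticons threading per-user partial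
-- spendings; equivalence of the return value is proved (A mutates no argument).

-- ===== PORT A =====
-- itertools.product(sales, repeat = n), transliterated (leftmost coordinate varies slowest)
def prodSalesA (sales : List Int) : Nat → List (List Int)
  | 0 => [[]]
  | n + 1 => sales.flatMap (fun r => (prodSalesA sales n).map (fun t => r :: t))

def solution (users : List (Int × Int)) (emoticons : List Int) : List Int :=
  let sales : List Int := [10, 20, 30, 40]
  (prodSalesA sales emoticons.length).foldl (fun answer sale =>
    let emo : List Int := (PySem.List.pyRange 0 (sale.length : Int) 1).foldl
      (fun emo i => emo ++ [PySem.List.pyGetD emoticons i 0 -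
        PySem.Int.floordiv (PySem.List.pyGetD emoticons i 0 * PySem.List.pyGetD sale i 0) 100]) []
    let pm : Int × Int := users.foldl (fun pm u =>
      let u_m : Int := (PySem.List.pyRange 0 (sale.length : Int) 1).foldl
        (fun u_m j => if u.1 ≤ PySem.List.pyGetD sale j 0 then u_m + PySem.List.pyGetD emo j 0 else u_m) 0
      if u.2 ≤ u_m then (pm.1 + 1, pm.2) else (pm.1, pm.2 + u_m)) (0, 0)
    if PySem.List.pyGetD answer 0 0 < pm.1 then [pm.1, pm.2]
    else if pm.1 = PySem.List.pyGetD answer 0 0 then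
      [PySem.List.pyGetD answer 0 0, max (PySem.List.pyGetD answer 1 0) pm.2]
    else answer) [0, 0]

-- ===== PORT B =====
-- dfs(i, ps): recursion over the remaining emoticons, ps = list of (user, partial spending)
def dfsB : List Int → List ((Int × Int) × Int) → (Int × Int) → (Int × Int)
  | [], ps, best =>
      let pm : Int × Int := ps.foldl
        (fun pm q => if q.1.2 ≤ q.2 then (pm.1 + 1, pm.2) else (pm.1, pm.2 + q.2)) (0, 0)
      if best.1 < pm.1 ∨ (pm.1 = best.1 ∧ best.2 < pm.2) then pm else best
  | p :: rest, ps, best =>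
      ([10, 20, 30, 40] : List Int).foldl
        (fun b rate =>
          let d := p - PySem.Int.floordiv (p * rate) 100
          dfsB rest (ps.map (fun q => if q.1.1 ≤ rate then (q.1, q.2 + d) else (q.1, q.2))) b)
        best
termination_by l _ _ => l.length

def solution_alt (users : List (Int × Int)) (emoticons : List Int) : List Int :=
  let best := dfsB emoticons (users.map (fun u => (u, (0 : Int)))) (0, 0)
  [best.1, best.2]

-- ===== PRECONDITION & SPEC =====
def Spec_solution (users : List (Int × Int)) (emoticons : List Int) (out : List Int) : Prop := out = solution_alt users emoticons
instance (users : List (Int × Int)) (emoticons : List Int) (out : List Int) : Decidable (Spec_solution users emoticons out) := by unfold Spec_solution; infer_instance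

-- ===== CLAIM (what is proved, stated in full; the proofs are below) =====
def Claim_equal_solution : Prop := ∀ (users : List (Int × Int)) (emoticons : List Int), Dom_solution users emoticons → Spec_solution users emoticons (solution users emoticons)

-- ===== LEMMAS AND PROOFS =====

-- best-pair update rule, shared shape of both programs
def upd (b s : Int × Int) : Int × Int :=
  if b.1 < s.1 ∨ (s.1 = b.1 ∧ b.2 < s.2) then s else b

-- (plus, money) computed from (user, spending) pairs
def leafScore (qs : List ((Int × Int) × Int)) : Int × Int :=
  qs.foldl (fun pm q => if q.1.2 ≤ q.2 then (pm.1 + 1, pm.2) else (pm.1, pm.2 + q.2)) (0, 0)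

-- total discounted spending of a user with threshold u1, starting from s
def fsum (u1 : Int) : List Int → List Int → Int → Int
  | [], _, s => s
  | _ :: _, [], s => s
  | p :: ps, r :: rs, s =>
      fsum u1 ps rs (if u1 ≤ r then s + (p - PySem.Int.floordiv (p * r) 100) else s)

lemma length_mem_prodSalesA (sales : List Int) :
    ∀ (n : Nat) (sale : List Int), sale ∈ prodSalesA sales n → sale.length = n := by
  intro n
  induction n with
  | zero => intro sale h; simp only [prodSalesA, List.mem_singleton] at h; simp [h]
  | succ n ih =>
    intro sale h
    simp only [prodSalesA, List.mem_flatMap, List.mem_map] at h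
    obtain ⟨r, -, t, ht, rfl⟩ := h
    simp [ih t ht]

lemma map_step (ps : List ((Int × Int) × Int)) (r d : Int) (rest sale : List Int) :
    (ps.map (fun q => if q.1.1 ≤ r then (q.1, q.2 + d) else (q.1, q.2))).map
        (fun q => (q.1, fsum q.1.1 rest sale q.2))
      = ps.map (fun q => (q.1, fsum q.1.1 rest sale (if q.1.1 ≤ r then q.2 + d else q.2))) := by
  rw [List.map_map]
  apply List.map_congr_left
  intro q _
  by_cases h : q.1.1 ≤ r <;> simp [h, Function.comp]

lemma dfsB_char : ∀ (emos : List Int) (ps : List ((Int × Int) × Int)) (best : Int × Int),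
    dfsB emos ps best =
      (prodSalesA [10, 20, 30, 40] emos.length).foldl
        (fun b sale => upd b (leafScore (ps.map (fun q => (q.1, fsum q.1.1 emos sale q.2))))) best := by
  intro emos
  induction emos with
  | nil =>
    intro ps best
    simp [dfsB, prodSalesA, upd, leafScore, fsum]
  | cons p rest ih =>
    intro ps best
    have key : ∀ (r : Int) (b : Int × Int),
        dfsB rest (ps.map (fun q =>
            if q.1.1 ≤ r then (q.1, q.2 + (p - PySem.Int.floordiv (p * r) 100)) else (q.1, q.2))) b
          = (prodSalesA [10, 20, 30, 40] rest.length).foldl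
              (fun b sale => upd b (leafScore (ps.map (fun q =>
                (q.1, fsum q.1.1 (p :: rest) (r :: sale) q.2))))) b := by
      intro r b
      rw [ih]
      apply PySem.List.foldl_congr_mem
      intro acc sale _
      congr 1
      rw [map_step]
      simp only [fsum]
    simp only [dfsB, List.foldl_cons, List.foldl_nil]
    rw [key 10, key 20, key 30, key 40]
    simp only [List.length_cons, prodSalesA, List.flatMap_cons, List.flatMap_nil,
      List.append_nil, List.foldl_append, List.foldl_map]

lemma range_foldl_fsum : ∀ (bl al : List Int), al.length = bl.length → ∀ (u1 s : Int),
    (List.range bl.length).foldl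
        (fun m k => if u1 ≤ bl.getD k 0 then
          m + (al.getD k 0 - PySem.Int.floordiv (al.getD k 0 * bl.getD k 0) 100) else m) s
      = fsum u1 al bl s := by
  intro bl
  induction bl with
  | nil =>
    intro al h u1 s
    cases al <;> simp_all [fsum]
  | cons r rs ih =>
    intro al h u1 s
    cases al with
    | nil => simp at h
    | cons p ps' =>
      simp only [List.length_cons, List.range_succ_eq_map, List.foldl_cons, List.foldl_map,
        List.getD_cons_zero, List.getD_cons_succ]
      rw [fsum]
      exact ih ps' (by simpa using h) u1 _

lemma score_eq (users : List (Int × Int)) (emoticons sale : List Int)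
    (h : emoticons.length = sale.length) :
    users.foldl (fun pm u =>
        let u_m : Int := (PySem.List.pyRange 0 (sale.length : Int) 1).foldl
          (fun u_m j => if u.1 ≤ PySem.List.pyGetD sale j 0 then
            u_m + PySem.List.pyGetD
              ((PySem.List.pyRange 0 (sale.length : Int) 1).foldl
                (fun emo i => emo ++ [PySem.List.pyGetD emoticons i 0 -
                  PySem.Int.floordiv (PySem.List.pyGetD emoticons i 0 * PySem.List.pyGetD sale i 0) 100]) []) j 0
            else u_m) 0
        if u.2 ≤ u_m then (pm.1 + 1, pm.2) else (pm.1, pm.2 + u_m)) ((0 : Int), (0 : Int))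
      = leafScore (users.map (fun u => (u, fsum u.1 emoticons sale 0))) := by
  have hemo : (PySem.List.pyRange 0 (sale.length : Int) 1).foldl
      (fun emo i => emo ++ [PySem.List.pyGetD emoticons i 0 -
        PySem.Int.floordiv (PySem.List.pyGetD emoticons i 0 * PySem.List.pyGetD sale i 0) 100]) []
      = (List.range sale.length).map (fun k => emoticons.getD k 0 -
          PySem.Int.floordiv (emoticons.getD k 0 * sale.getD k 0) 100) := by
    rw [PySem.List.pyRange_zero_nat, List.foldl_map]
    simp only [PySem.List.foldl_append_singleton_eq_map, List.nil_append,
      PySem.List.pyGetD_natCast]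
  rw [leafScore, List.foldl_map]
  apply PySem.List.foldl_congr_mem
  intro pm u _
  have hu : (PySem.List.pyRange 0 (sale.length : Int) 1).foldl
      (fun u_m j => if u.1 ≤ PySem.List.pyGetD sale j 0 then
        u_m + PySem.List.pyGetD
          ((PySem.List.pyRange 0 (sale.length : Int) 1).foldl
            (fun emo i => emo ++ [PySem.List.pyGetD emoticons i 0 -
              PySem.Int.floordiv (PySem.List.pyGetD emoticons i 0 * PySem.List.pyGetD sale i 0) 100]) []) j 0
        else u_m) 0 = fsum u.1 emoticons sale 0 := by
    rw [hemo, PySem.List.pyRange_zero_nat, List.foldl_map]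
    simp only [PySem.List.pyGetD_natCast]
    rw [PySem.List.foldl_congr_mem _ _
      (fun m k => if u.1 ≤ sale.getD k 0 then
        m + (emoticons.getD k 0 - PySem.Int.floordiv (emoticons.getD k 0 * sale.getD k 0) 100) else m) _
      (by
        intro acc k hk
        rw [PySem.List.getD_map_range _ _ _ _ (List.mem_range.mp hk)])]
    exact range_foldl_fsum sale emoticons h u.1 0
  simp only [hu]

lemma foldl_pair_list (g : Int × Int → List Int → Int × Int) (f : List Int → List Int → List Int) :
    ∀ (combos : List (List Int)),
      (∀ (x y : Int), ∀ sale ∈ combos, f [x, y] sale = [(g (x, y) sale).1, (g (x, y) sale).2]) →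
      ∀ x y, combos.foldl f [x, y] = [(combos.foldl g (x, y)).1, (combos.foldl g (x, y)).2] := by
  intro combos
  induction combos with
  | nil => intro _ x y; simp
  | cons c cs ih =>
    intro h x y
    simp only [List.foldl_cons]
    rw [h x y c (List.mem_cons_self ..)]
    have := ih (fun x y sale hs => h x y sale (List.mem_cons_of_mem _ hs)) (g (x, y) c).1 (g (x, y) c).2
    simpa using this

lemma step_eq (users : List (Int × Int)) (emoticons : List Int) (x y : Int) (sale : List Int)
    (hlen : sale.length = emoticons.length) :
    (let emo : List Int := (PySem.List.pyRange 0 (sale.length : Int) 1).foldl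
        (fun emo i => emo ++ [PySem.List.pyGetD emoticons i 0 -
          PySem.Int.floordiv (PySem.List.pyGetD emoticons i 0 * PySem.List.pyGetD sale i 0) 100]) []
     let pm : Int × Int := users.foldl (fun pm u =>
        let u_m : Int := (PySem.List.pyRange 0 (sale.length : Int) 1).foldl
          (fun u_m j => if u.1 ≤ PySem.List.pyGetD sale j 0 then u_m + PySem.List.pyGetD emo j 0 else u_m) 0
        if u.2 ≤ u_m then (pm.1 + 1, pm.2) else (pm.1, pm.2 + u_m)) (0, 0)
     if PySem.List.pyGetD [x, y] 0 0 < pm.1 then [pm.1, pm.2]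
     else if pm.1 = PySem.List.pyGetD [x, y] 0 0 then
       [PySem.List.pyGetD [x, y] 0 0, max (PySem.List.pyGetD [x, y] 1 0) pm.2]
     else [x, y])
      = [(upd (x, y) (leafScore (users.map (fun u => (u, fsum u.1 emoticons sale 0))))).1,
         (upd (x, y) (leafScore (users.map (fun u => (u, fsum u.1 emoticons sale 0))))).2] := by
  have hx : PySem.List.pyGetD ([x, y] : List Int) 0 0 = x := rfl
  have hy : PySem.List.pyGetD ([x, y] : List Int) 1 0 = y := rfl
  simp only [hx, hy]
  rw [score_eq users emoticons sale hlen.symm]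
  set S := leafScore (users.map (fun u => (u, fsum u.1 emoticons sale 0))) with hS
  by_cases h1 : x < S.1
  · simp [upd, h1]
  · by_cases h2 : S.1 = x
    · by_cases h3 : y < S.2
      · simp [upd, h2, h3, max_eq_right h3.le]
      · simp [upd, h2, h3, max_eq_left (not_lt.mp h3)]
    · simp [upd, h1, h2]

-- ===== VERDICT (by name: the statement is the Claim_ definition above) =====
theorem solution_spec : Claim_equal_solution := by
  intro users emoticons _
  show solution users emoticons = solution_alt users emoticons
  simp only [solution_alt]
  rw [dfsB_char]
  have hg : (fun (b : Int × Int) (sale : List Int) => upd b (leafScore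
        ((users.map (fun u => (u, (0 : Int)))).map (fun q => (q.1, fsum q.1.1 emoticons sale q.2)))))
      = (fun (b : Int × Int) (sale : List Int) => upd b (leafScore
        (users.map (fun u => (u, fsum u.1 emoticons sale 0))))) := by
    funext b sale
    rw [List.map_map]
    rfl
  rw [hg]
  unfold solution
  exact foldl_pair_list _ _ _
    (fun x y sale hmem =>
      step_eq users emoticons x y sale (length_mem_prodSalesA _ _ sale hmem)) 0 0
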